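-- pv_equiv track=rewrite | github.com/Grow-with-Open-Source/Python-Projects | securepass/password.py | password_report
-- ===== SOURCE A (Python) =====
-- def password_report(password: str) -> str:
--     recommended_length = 8
--
--     length = len(password)
--     upper = sum(1 for ch in password if ch.isupper())
--     lower = sum(1 for ch in password if ch.islower())
--     digits = sum(1 for ch in password if ch.isdigit())
--     symbols = sum(1 for ch in password if not ch.isalnum())
--
--     parts = []
--
--     # Length report
--     diff = recommended_length - length
--     if diff > 0:
--         parts.append(
--             f"The password has a length of {length} characters, {diff} less than the recommended {recommended_length}."
--         )
--     else:
--         parts.append(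
--             f"The password has a length of {length} characters, which meets or exceeds the recommended {recommended_length}."
--         )
--
--     # Composition report
--     parts.append(
--         f"It has {upper} uppercase letter(s), {lower} lowercase letter(s), {digits} number(s), and {symbols} symbol(s)."
--     )
--
--     suggestions = []
--     if upper == 0:
--         suggestions.append("add at least one uppercase letter")
--     if lower == 0:
--         suggestions.append("add at least one lowercase letter")
--     if digits == 0:
--         suggestions.append("add at least one number")
--     if symbols == 0:
--         suggestions.append("add a symbol for extra strength")
--
--     if suggestions:
--         parts.append(
--             "To improve this password, you could " + ", ".join(suggestions) + "."
--         )
--     else: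
--         parts.append("This password has a good mix of character types.")
--
--     return " ".join(parts)
-- ===== SOURCE B (Python) =====
-- def password_report(password: str) -> str:
--     recommended_length = 8
--
--     def category(ch):
--         if ch.isupper():
--             return "upper"
--         elif ch.islower():
--             return "lower"
--         elif ch.isdigit():
--             return "digit"
--         elif ch.isalnum():
--             return "other"
--         else:
--             return "symbol"
--
--     counts = {}
--     for ch in password:
--         k = category(ch)
--         counts[k] = counts.get(k, 0) + 1
--
--     length = len(password)
--     upper = counts.get("upper", 0)
--     lower = counts.get("lower", 0)
--     digits = counts.get("digit", 0)
--     symbols = counts.get("symbol", 0)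
--
--     parts = []
--
--     diff = recommended_length - length
--     if diff > 0:
--         parts.append(
--             f"The password has a length of {length} characters, {diff} less than the recommended {recommended_length}."
--         )
--     else:
--         parts.append(
--             f"The password has a length of {length} characters, which meets or exceeds the recommended {recommended_length}."
--         )
--
--     parts.append(
--         f"It has {upper} uppercase letter(s), {lower} lowercase letter(s), {digits} number(s), and {symbols} symbol(s)."
--     )
--
--     advice_table = [
--         (upper, "add at least one uppercase letter"),
--         (lower, "add at least one lowercase letter"),
--         (digits, "add at least one number"),
--         (symbols, "add a symbol for extra strength"),
--     ]
--     suggestions = [msg for cnt, msg in advice_table if cnt == 0]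
--
--     if suggestions:
--         parts.append(
--             "To improve this password, you could " + ", ".join(suggestions) + "."
--         )
--     else:
--         parts.append("This password has a good mix of character types.")
--
--     return " ".join(parts)
-- ===== Notes on version B (the rewrite author's own statement) =====
-- stated objective: alternative
-- what changed: A's four separate sum-scans are replaced by a classify-then-tally design: each character is assigned exactly one category by an elif chain, the categories are tallied in one dict, and the suggestions come from a table comprehension instead of four if-append statements.
import Mathlib
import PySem

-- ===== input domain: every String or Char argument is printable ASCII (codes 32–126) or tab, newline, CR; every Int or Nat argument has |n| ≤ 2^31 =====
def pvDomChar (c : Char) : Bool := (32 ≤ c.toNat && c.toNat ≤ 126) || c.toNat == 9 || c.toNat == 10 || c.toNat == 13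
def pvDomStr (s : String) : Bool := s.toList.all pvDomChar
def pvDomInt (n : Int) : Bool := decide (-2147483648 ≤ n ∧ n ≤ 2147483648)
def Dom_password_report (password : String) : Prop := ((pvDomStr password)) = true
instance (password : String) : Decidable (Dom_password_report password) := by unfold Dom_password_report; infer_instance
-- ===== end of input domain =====

-- B replaces A's four separate counting scans with classify-then-tally: each character
-- gets exactly one category from an elif chain, tallied in one dict, and the suggestion
-- list comes from a table comprehension (objective: alternative).

-- ===== PORT A =====
def password_report (password : String) : String :=
  let recommended_length : Int := 8
  let length : Int := PySem.Str.len password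
  -- sum(1 for ch in password if ch.isupper()) etc.: count of characters satisfying the test
  let upper : Int := (password.toList.countP (fun ch => PySem.Chars.isupper ch) : Int)
  let lower : Int := (password.toList.countP (fun ch => PySem.Chars.islower ch) : Int)
  let digits : Int := (password.toList.countP (fun ch => PySem.Chars.isdigit ch) : Int)
  let symbols : Int := (password.toList.countP (fun ch => !PySem.Chars.isalnum ch) : Int)
  let parts : List String := []
  let diff := recommended_length - length
  let parts := parts ++ [if diff > 0 then
      "The password has a length of " ++ PySem.Int.toStr length ++ " characters, " ++
        PySem.Int.toStr diff ++ " less than the recommended " ++ PySem.Int.toStr recommended_length ++ "."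
    else
      "The password has a length of " ++ PySem.Int.toStr length ++
        " characters, which meets or exceeds the recommended " ++ PySem.Int.toStr recommended_length ++ "."]
  let parts := parts ++ ["It has " ++ PySem.Int.toStr upper ++ " uppercase letter(s), " ++
      PySem.Int.toStr lower ++ " lowercase letter(s), " ++ PySem.Int.toStr digits ++
      " number(s), and " ++ PySem.Int.toStr symbols ++ " symbol(s)."]
  let suggestions : List String := []
  let suggestions := if upper == 0 then suggestions ++ ["add at least one uppercase letter"] else suggestions
  let suggestions := if lower == 0 then suggestions ++ ["add at least one lowercase letter"] else suggestions
  let suggestions := if digits == 0 then suggestions ++ ["add at least one number"] else suggestions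
  let suggestions := if symbols == 0 then suggestions ++ ["add a symbol for extra strength"] else suggestions
  let parts := if suggestions ≠ [] then
      parts ++ ["To improve this password, you could " ++ PySem.Str.join ", " suggestions ++ "."]
    else
      parts ++ ["This password has a good mix of character types."]
  PySem.Str.join " " parts

-- ===== PORT B =====
-- Source B's `category`: elif chain assigning each character exactly one category
def pwCategory (ch : Char) : String :=
  if PySem.Chars.isupper ch then "upper"
  else if PySem.Chars.islower ch then "lower"
  else if PySem.Chars.isdigit ch then "digit"
  else if PySem.Chars.isalnum ch then "other"
  else "symbol"

def password_report_alt (password : String) : String :=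
  let recommended_length : Int := 8
  -- the tally loop: counts[k] = counts.get(k, 0) + 1
  let counts : PySem.Dict String Int :=
    password.toList.foldl (fun d ch => d.modify (pwCategory ch) 0 (· + 1)) PySem.Dict.empty
  let length : Int := PySem.Str.len password
  let upper : Int := counts.getD "upper" 0
  let lower : Int := counts.getD "lower" 0
  let digits : Int := counts.getD "digit" 0
  let symbols : Int := counts.getD "symbol" 0
  let parts : List String := []
  let diff := recommended_length - length
  let parts := parts ++ [if diff > 0 then
      "The password has a length of " ++ PySem.Int.toStr length ++ " characters, " ++
        PySem.Int.toStr diff ++ " less than the recommended " ++ PySem.Int.toStr recommended_length ++ "."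
    else
      "The password has a length of " ++ PySem.Int.toStr length ++
        " characters, which meets or exceeds the recommended " ++ PySem.Int.toStr recommended_length ++ "."]
  let parts := parts ++ ["It has " ++ PySem.Int.toStr upper ++ " uppercase letter(s), " ++
      PySem.Int.toStr lower ++ " lowercase letter(s), " ++ PySem.Int.toStr digits ++
      " number(s), and " ++ PySem.Int.toStr symbols ++ " symbol(s)."]
  let advice_table : List (Int × String) :=
    [(upper, "add at least one uppercase letter"),
     (lower, "add at least one lowercase letter"),
     (digits, "add at least one number"),
     (symbols, "add a symbol for extra strength")]
  let suggestions := (advice_table.filter (fun p => p.1 == 0)).map (·.2)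
  let parts := if suggestions ≠ [] then
      parts ++ ["To improve this password, you could " ++ PySem.Str.join ", " suggestions ++ "."]
    else
      parts ++ ["This password has a good mix of character types."]
  PySem.Str.join " " parts

-- ===== PRECONDITION & SPEC =====
def Spec_password_report (password : String) (out : String) : Prop := out = password_report_alt password
instance (password : String) (out : String) : Decidable (Spec_password_report password out) := by unfold Spec_password_report; infer_instance

-- ===== CLAIM (what is proved, stated in full; the proofs are below) =====
def Claim_equal_password_report : Prop := ∀ (password : String), Dom_password_report password → Spec_password_report password (password_report password)

-- ===== LEMMAS AND PROOFS =====
-- the tally of category k equals the count of characters classified as k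
theorem pwCounts_getD (cs : List Char) (k : String) :
    (cs.foldl (fun d ch => d.modify (pwCategory ch) 0 (· + 1)) PySem.Dict.empty).getD k 0
      = (cs.countP (fun ch => pwCategory ch == k) : Int) := by
  have h := List.foldl_map (l := cs) (g := fun (d : PySem.Dict String Int) x => d.modify x 0 (· + 1))
      (f := pwCategory) (init := PySem.Dict.empty)
  rw [← h, PySem.Dict.getD_foldl_modify_add_one]
  simp only [List.count_eq_countP, List.countP_map, PySem.Dict.getD_empty,
    zero_add]
  rfl

-- each category test agrees with A's predicate (the categories partition the characters:
-- upper/lower/digit ranges are disjoint and isalnum = isupper ∨ islower ∨ isdigit in PySem)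
theorem pwCategory_upper (ch : Char) : (pwCategory ch == "upper") = PySem.Chars.isupper ch := by
  unfold pwCategory; split_ifs <;> simp_all
theorem pwCategory_lower (ch : Char) : (pwCategory ch == "lower") = PySem.Chars.islower ch := by
  unfold pwCategory
  split_ifs <;>
    simp_all [PySem.Chars.isupper, PySem.Chars.islower, Char.le_def, UInt32.le_iff_toNat_le] <;>
    omega
theorem pwCategory_digit (ch : Char) : (pwCategory ch == "digit") = PySem.Chars.isdigit ch := by
  unfold pwCategory
  split_ifs <;>
    simp_all [PySem.Chars.isupper, PySem.Chars.islower, PySem.Chars.isdigit, Char.le_def,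
      UInt32.le_iff_toNat_le] <;>
    omega
theorem pwCategory_symbol (ch : Char) : (pwCategory ch == "symbol") = !PySem.Chars.isalnum ch := by
  unfold pwCategory
  split_ifs <;> simp_all [PySem.Chars.isalnum, PySem.Chars.isalpha]

-- ===== VERDICT (by name: the statement is the Claim_ definition above) =====
theorem password_report_spec : Claim_equal_password_report := by
  intro password _
  unfold Spec_password_report password_report password_report_alt
  have key : ∀ u l d s : Int,
      (if s == 0 then
         (if d == 0 then
            (if l == 0 then
               (if u == 0 then ([] : List String) ++ ["add at least one uppercase letter"] else []) ++
                 ["add at least one lowercase letter"]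
             else
               (if u == 0 then ([] : List String) ++ ["add at least one uppercase letter"] else [])) ++
              ["add at least one number"]
          else
            (if l == 0 then
               (if u == 0 then ([] : List String) ++ ["add at least one uppercase letter"] else []) ++
                 ["add at least one lowercase letter"]
             else
               (if u == 0 then ([] : List String) ++ ["add at least one uppercase letter"] else []))) ++
           ["add a symbol for extra strength"]
       else
         if d == 0 then
           (if l == 0 then
              (if u == 0 then ([] : List String) ++ ["add at least one uppercase letter"] else []) ++
                ["add at least one lowercase letter"]
            else
              (if u == 0 then ([] : List String) ++ ["add at least one uppercase letter"] else [])) ++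
             ["add at least one number"]
         else
           if l == 0 then
             (if u == 0 then ([] : List String) ++ ["add at least one uppercase letter"] else []) ++
               ["add at least one lowercase letter"]
           else
             if u == 0 then ([] : List String) ++ ["add at least one uppercase letter"] else [])
      = (([(u, "add at least one uppercase letter"), (l, "add at least one lowercase letter"),
            (d, "add at least one number"), (s, "add a symbol for extra strength")] :
              List (Int × String)).filter (fun p => p.1 == 0)).map (·.2) := by
    intro u l d s
    cases hu : u == 0 <;> cases hl : l == 0 <;> cases hd : d == 0 <;> cases hs : s == 0 <;>
      simp [hu, hl, hd, hs, List.filter]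
  simp only [pwCounts_getD, pwCategory_upper, pwCategory_lower, pwCategory_digit,
    pwCategory_symbol, key]
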